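-- pv_equiv track=rewrite | github.com/kristian-petras/hackkosice2024 | server/wav.py | _group_frequencies
-- ===== SOURCE A (Python) =====
-- def _group_frequencies(frequencies):
--     grouped_frequencies = []
--     count = 1
--     for i in range(len(frequencies)-1):
--         if frequencies[i] == frequencies[i+1]:
--             count += 1
--         else:
--             grouped_frequencies.append((frequencies[i], count))
--             count = 1
--     grouped_frequencies.append((frequencies[-1], count))
--     return grouped_frequencies
-- ===== SOURCE B (Python) =====
-- def _group_frequencies(frequencies):
--     n = len(frequencies)
--     ends = [i for i in range(n - 1) if frequencies[i] != frequencies[i + 1]] + [n - 1]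
--     starts = [0] + [e + 1 for e in ends]
--     return [(frequencies[e], e - s + 1) for s, e in zip(starts, ends)]
-- ===== Notes on version B (the rewrite author's own statement) =====
-- stated objective: alternative
-- what changed: Replaces A's single pass with a running counter and flush-on-change by a two-stage index computation: first collect the boundary positions where adjacent values differ (the run end indices), then pair them with the derived run start indices and emit (value at end, end - start + 1), so no counter is ever maintained; Pre_ excludes the empty list, where A unconditionally reads the last element and raises IndexError (B also raises IndexError there).
import Mathlib
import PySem

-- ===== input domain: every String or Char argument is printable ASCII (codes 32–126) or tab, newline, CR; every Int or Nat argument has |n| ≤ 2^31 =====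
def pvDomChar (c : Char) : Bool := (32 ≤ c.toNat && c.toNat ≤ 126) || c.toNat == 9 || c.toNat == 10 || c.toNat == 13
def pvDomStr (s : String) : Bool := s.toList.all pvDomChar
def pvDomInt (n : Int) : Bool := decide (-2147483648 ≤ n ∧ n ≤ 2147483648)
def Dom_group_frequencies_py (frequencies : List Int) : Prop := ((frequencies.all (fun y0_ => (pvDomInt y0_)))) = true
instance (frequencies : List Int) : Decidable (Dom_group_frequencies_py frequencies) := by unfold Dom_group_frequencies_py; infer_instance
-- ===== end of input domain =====

-- B replaces A's running-counter pass by a two-stage index computation (boundary positions,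
-- then counts as index differences); on the empty list both raise IndexError (excluded by Pre_).


-- ===== PORT A =====
-- literal transliteration: fold over range(len-1) comparing frequencies[i] with
-- frequencies[i+1] (both in range on every iteration, hence pyGetD), then the final
-- last-element append (pyGet? returns none exactly where Python raises IndexError, excluded by Pre_).
def group_frequencies_py (frequencies : List Int) : List (Int × Int) :=
  let st := (PySem.List.pyRange 0 ((frequencies.length : Int) - 1) 1).foldl
    (fun (p : List (Int × Int) × Int) i =>
      if PySem.List.pyGetD frequencies i 0 = PySem.List.pyGetD frequencies (i + 1) 0 then
        (p.1, p.2 + 1)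
      else
        (p.1 ++ [(PySem.List.pyGetD frequencies i 0, p.2)], 1))
    ([], 1)
  match PySem.List.pyGet? frequencies (-1) with
  | some last => st.1 ++ [(last, st.2)]
  | none => []

-- ===== PORT B =====
-- two stages: `ends` = the indices i with frequencies[i] != frequencies[i+1], plus n-1;
-- `starts` = 0 followed by each end shifted by one (zip truncates the spare last start,
-- exactly as Python's zip does); each run is emitted as (value at its end, end - start + 1).
-- frequencies[e] is in range for every non-empty input (guaranteed by Pre_), where pyGetD is exact.
def group_frequencies_py_alt (frequencies : List Int) : List (Int × Int) :=
  let n : Int := frequencies.length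
  let ends : List Int :=
    ((PySem.List.pyRange 0 (n - 1) 1).filter
      (fun i => PySem.List.pyGetD frequencies i 0 != PySem.List.pyGetD frequencies (i + 1) 0))
    ++ [n - 1]
  let starts : List Int := 0 :: ends.map (· + 1)
  (starts.zip ends).map (fun p => (PySem.List.pyGetD frequencies p.2 0, p.2 - p.1 + 1))

-- ===== PRECONDITION & SPEC =====
-- A reads the last element unconditionally, so it raises IndexError on the empty list (B does too).
def Pre_group_frequencies_py (frequencies : List Int) : Prop := frequencies ≠ []
instance (frequencies : List Int) : Decidable (Pre_group_frequencies_py frequencies) := by unfold Pre_group_frequencies_py; infer_instance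
def pvWitness_group_frequencies_py : List Int := [1, 1, 2]

def Spec_group_frequencies_py (frequencies : List Int) (out : List (Int × Int)) : Prop := out = group_frequencies_py_alt frequencies
instance (frequencies : List Int) (out : List (Int × Int)) : Decidable (Spec_group_frequencies_py frequencies out) := by unfold Spec_group_frequencies_py; infer_instance

-- ===== CLAIM (what is proved, stated in full; the proofs are below) =====
def Claim_equal_group_frequencies_py : Prop := ∀ (frequencies : List Int), Dom_group_frequencies_py frequencies → Pre_group_frequencies_py frequencies → Spec_group_frequencies_py frequencies (group_frequencies_py frequencies)

-- ===== LEMMAS AND PROOFS =====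

-- canonical run-length encoding both ports are reduced to
def pvRuns (k : Int) (c : Int) : List Int → List (Int × Int)
  | [] => [(k, c)]
  | x :: xs => if x = k then pvRuns k (c + 1) xs else (k, c) :: pvRuns x 1 xs

----- A-side: A's fold over adjacent index pairs computes pvRuns -----

-- A's index loop reads only the adjacent pairs (fs[i], fs[i+1]); those are fs.zip fs.tail.
theorem pv_map_range_zip (fs : List Int) :
    (PySem.List.pyRange 0 ((fs.length : Int) - 1) 1).map
      (fun i => (PySem.List.pyGetD fs i 0, PySem.List.pyGetD fs (i + 1) 0))
    = fs.zip fs.tail := by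
  rw [PySem.List.pyRange_one]
  apply List.ext_getElem
  · simp [List.length_zip]
  · intro k h1 h2
    simp only [List.getElem_map, List.getElem_range, List.getElem_zip]
    simp at h1
    have h1' : (0:Int) + (k:Int) = (k:Int) := by ring
    rw [h1']
    have e1 : PySem.List.pyGetD fs (k:Int) 0 = fs[k] := by
      rw [PySem.List.pyGetD_natCast]; exact List.getD_eq_getElem _ _ (by omega)
    have e2 : PySem.List.pyGetD fs ((k:Int) + 1) 0 = fs[k+1] := by
      have : ((k:Int)+1) = ((k+1:Nat):Int) := by push_cast; ring
      rw [this, PySem.List.pyGetD_natCast]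
      exact List.getD_eq_getElem _ _ (by omega)
    rw [e1, e2]
    congr 1
    rw [List.getElem_tail]

-- the flushed prefix plus the final (last element, count) append is exactly pvRuns
theorem pv_zip_foldl_runs (x : Int) (xs : List Int) (acc : List (Int × Int)) (c : Int) :
    (((x :: xs).zip xs).foldl
        (fun (p : List (Int × Int) × Int) (q : Int × Int) =>
          if q.1 = q.2 then (p.1, p.2 + 1) else (p.1 ++ [(q.1, p.2)], 1)) (acc, c)).1
      ++ [((x :: xs).getLast (by simp),
          (((x :: xs).zip xs).foldl
            (fun (p : List (Int × Int) × Int) (q : Int × Int) =>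
              if q.1 = q.2 then (p.1, p.2 + 1) else (p.1 ++ [(q.1, p.2)], 1)) (acc, c)).2)]
    = acc ++ pvRuns x c xs := by
  induction xs generalizing x acc c with
  | nil => simp [pvRuns]
  | cons y ys ih =>
    simp only [List.zip_cons_cons, List.foldl_cons]
    by_cases hxy : x = y
    · simp only [hxy]
      have := ih y acc (c + 1)
      simpa [pvRuns, hxy, List.getLast_cons] using this
    · simp only [if_neg hxy]
      have := ih y (acc ++ [(x, c)]) 1
      rw [List.getLast_cons (by simp : (y :: ys) ≠ [])]
      rw [this]
      simp [pvRuns, hxy, Ne.symm, List.append_assoc]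

theorem pv_a_runs (x : Int) (xs : List Int) :
    group_frequencies_py (x :: xs) = pvRuns x 1 xs := by
  have hlast : PySem.List.pyGet? (x :: xs) (-1) = some ((x :: xs).getLast (by simp)) := by
    rw [PySem.List.pyGet?_neg_one, List.getLast?_eq_some_getLast]
  have h1 : (PySem.List.pyRange 0 (((x :: xs).length : Int) - 1) 1).foldl
      (fun (p : List (Int × Int) × Int) i =>
        if PySem.List.pyGetD (x :: xs) i 0 = PySem.List.pyGetD (x :: xs) (i + 1) 0 then
          (p.1, p.2 + 1)
        else
          (p.1 ++ [(PySem.List.pyGetD (x :: xs) i 0, p.2)], 1))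
      ([], 1)
      = ((x :: xs).zip xs).foldl
        (fun (p : List (Int × Int) × Int) (q : Int × Int) =>
          if q.1 = q.2 then (p.1, p.2 + 1) else (p.1 ++ [(q.1, p.2)], 1)) ([], 1) := by
    rw [show ((x :: xs).zip xs) = ((x :: xs).zip (x :: xs).tail) from rfl,
        ← pv_map_range_zip (x :: xs), List.foldl_map]
  unfold group_frequencies_py
  simp only [hlast, h1]
  exact pv_zip_foldl_runs x xs [] 1

----- B-side: the boundary-index construction computes pvRuns -----

-- Nat-level boundary positions: indices k with fs[k] ≠ fs[k+1]
def pvBrk : List Int → List Nat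
  | [] => []
  | [_] => []
  | x :: y :: t => if x = y then (pvBrk (y :: t)).map (· + 1) else 0 :: (pvBrk (y :: t)).map (· + 1)

-- Nat-level emission of one run from its (start, end) index pair
def pvEmit (fs : List Int) (p : Nat × Nat) : Int × Int :=
  (fs.getD p.2 0, (p.2 : Int) - (p.1 : Int) + 1)

-- increment the count of the first run
def pvBump : List (Int × Int) → List (Int × Int)
  | [] => []
  | (a, b) :: r => (a, b + 1) :: r

theorem pvRuns_bump (xs : List Int) : ∀ (k : Int) (c : Int),
    pvRuns k (c + 1) xs = pvBump (pvRuns k c xs) := by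
  induction xs with
  | nil => intro k c; simp [pvRuns, pvBump]
  | cons x xs ih =>
    intro k c
    by_cases h : x = k
    · simp only [pvRuns, if_pos h]; exact ih k (c + 1)
    · simp [pvRuns, h, pvBump]

-- consing an element shifts every (start, end) pair by one and leaves runs unchanged
theorem pv_shift (S E : List Nat) (x : Int) (fs : List Int) :
    ((S.map (· + 1)).zip (E.map (· + 1))).map (pvEmit (x :: fs))
    = (S.zip E).map (pvEmit fs) := by
  rw [List.zip_map, List.map_map]
  apply List.map_congr_left
  rintro ⟨s, e⟩ -
  simp only [Function.comp_apply, Prod.map_apply, pvEmit, List.getD_cons_succ]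
  congr 1
  push_cast; ring

-- consing an equal element bumps the first run's count
theorem pv_bump_zip (S E : List Nat) (x : Int) (fs : List Int) :
    ((0 :: S.map (· + 1)).zip (E.map (· + 1))).map (pvEmit (x :: fs))
    = pvBump (((0 :: S).zip E).map (pvEmit fs)) := by
  cases E with
  | nil => simp [pvBump]
  | cons e0 E' =>
    have hbump : ∀ (a : Int × Int) (r : List (Int × Int)),
        pvBump (a :: r) = (a.1, a.2 + 1) :: r := by
      rintro ⟨a1, a2⟩ r; rfl
    simp only [List.map_cons, List.zip_cons_cons, hbump]
    rw [pv_shift]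
    congr 1

-- the filter over the index range is pvBrk
theorem pv_brk_eq (xs : List Int) : ∀ (x : Int),
    (List.range xs.length).filter
      (fun k => (x :: xs).getD k 0 != (x :: xs).getD (k + 1) 0)
    = pvBrk (x :: xs) := by
  induction xs with
  | nil => intro x; simp [pvBrk]
  | cons y t ih =>
    intro x
    rw [List.length_cons, List.range_succ_eq_map, List.filter_cons, List.filter_map]
    have hpred : ((fun k => (x :: y :: t).getD k 0 != (x :: y :: t).getD (k + 1) 0) ∘ Nat.succ)
        = (fun k => (y :: t).getD k 0 != (y :: t).getD (k + 1) 0) := by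
      funext k; simp
    rw [hpred, ih y]
    by_cases h : x = y
    · simp [pvBrk, h]
    · simp [pvBrk, h]

-- zip truncates the spare shifted last start
theorem pv_trunc (B : List Nat) (m : Nat) :
    (0 :: ((B ++ [m]).map (· + 1))).zip (B ++ [m])
    = (0 :: B.map (· + 1)).zip (B ++ [m]) := by
  have h1 : (0 :: (B ++ [m]).map (· + 1)) = (0 :: B.map (· + 1)) ++ [m + 1] := by
    simp
  rw [h1, show B ++ [m] = (B ++ [m]) ++ [] by simp,
      List.zip_append (by simp)]
  simp

-- the boundary-index construction equals pvRuns
theorem pv_main_alt (xs : List Int) : ∀ (x : Int),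
    ((0 :: (pvBrk (x :: xs)).map (· + 1)).zip (pvBrk (x :: xs) ++ [xs.length])).map
      (pvEmit (x :: xs))
    = pvRuns x 1 xs := by
  induction xs with
  | nil =>
    intro x
    simp [pvBrk, pvRuns, pvEmit]
  | cons y t ih =>
    intro x
    by_cases h : x = y
    · subst h
      have hb : pvBrk (x :: x :: t) = (pvBrk (x :: t)).map (· + 1) := by
        simp [pvBrk]
      have hE : (pvBrk (x :: t)).map (· + 1) ++ [(x :: t).length]
          = ((pvBrk (x :: t)) ++ [t.length]).map (· + 1) := by simp
      rw [hb, show (x :: t).length = t.length + 1 from rfl] at *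
      rw [hE, pv_bump_zip, ih x]
      have hr : pvRuns x 1 (x :: t) = pvBump (pvRuns x 1 t) := by
        rw [show pvRuns x 1 (x :: t)
              = if x = x then pvRuns x (1 + 1) t else (x, 1) :: pvRuns x 1 t from rfl,
            if_pos rfl, pvRuns_bump]
      rw [hr]
    · have hb : pvBrk (x :: y :: t) = 0 :: (pvBrk (y :: t)).map (· + 1) := by
        simp [pvBrk, h]
      have hE : (pvBrk (y :: t)).map (· + 1) ++ [(y :: t).length]
          = ((pvBrk (y :: t)) ++ [t.length]).map (· + 1) := by simp
      rw [hb]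
      simp only [List.map_cons, List.cons_append, List.zip_cons_cons]
      have hS : ((((0 : Nat) + 1)) :: ((pvBrk (y :: t)).map (· + 1)).map (· + 1))
          = (0 :: (pvBrk (y :: t)).map (· + 1)).map (· + 1) := by simp
      rw [hS, hE, pv_shift, ih y]
      simp only [pvRuns, if_neg (Ne.symm h)]
      congr 1

-- bridge: the Int-level port of B is the Nat-level boundary construction
theorem pv_alt_eq (x : Int) (xs : List Int) :
    group_frequencies_py_alt (x :: xs) = pvRuns x 1 xs := by
  have hlen : (((x :: xs).length : Int) - 1) = (xs.length : Int) := by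
    push_cast [List.length_cons]; ring
  have hrange : PySem.List.pyRange 0 (((x :: xs).length : Int) - 1) 1
      = (List.range xs.length).map (fun (k : Nat) => (k : Int)) := by
    rw [hlen, PySem.List.pyRange_one,
        show (((xs.length : Int)) - 0).toNat = xs.length from by omega]
    apply List.map_congr_left
    intro k _
    omega
  have hends : ((PySem.List.pyRange 0 (((x :: xs).length : Int) - 1) 1).filter
        (fun i => PySem.List.pyGetD (x :: xs) i 0 != PySem.List.pyGetD (x :: xs) (i + 1) 0))
      ++ [(((x :: xs).length : Int) - 1)]
      = (pvBrk (x :: xs) ++ [xs.length]).map (fun (k : Nat) => (k : Int)) := by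
    rw [hrange, List.filter_map, List.map_append, hlen, ← pv_brk_eq xs x]
    congr 2
    apply List.filter_congr
    intro k _
    simp only [Function.comp_apply]
    rw [show ((k : Int) + 1) = ((k + 1 : Nat) : Int) from by push_cast; ring,
        PySem.List.pyGetD_natCast, PySem.List.pyGetD_natCast]
  have hgoal : group_frequencies_py_alt (x :: xs)
      = ((0 :: (((pvBrk (x :: xs) ++ [xs.length]).map (fun (k : Nat) => (k : Int))).map (· + 1))).zip
          ((pvBrk (x :: xs) ++ [xs.length]).map (fun (k : Nat) => (k : Int)))).map
          (fun p : Int × Int => (PySem.List.pyGetD (x :: xs) p.2 0, p.2 - p.1 + 1)) := by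
    simp only [group_frequencies_py_alt]
    rw [hends]
  rw [hgoal]
  have hstarts : (((pvBrk (x :: xs) ++ [xs.length]).map (fun (k : Nat) => (k : Int))).map (· + 1))
      = (((pvBrk (x :: xs) ++ [xs.length]).map (· + 1)).map (fun (k : Nat) => (k : Int))) := by
    simp only [List.map_map]
    apply List.map_congr_left
    intro k _
    simp [Function.comp]
  rw [hstarts]
  have hcons : ((0 : Int) :: ((pvBrk (x :: xs) ++ [xs.length]).map (· + 1)).map (fun (k : Nat) => (k : Int)))
      = ((0 :: (pvBrk (x :: xs) ++ [xs.length]).map (· + 1)).map (fun (k : Nat) => (k : Int))) := rfl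
  rw [hcons, List.zip_map, List.map_map]
  have hemit : ((fun p : Int × Int => (PySem.List.pyGetD (x :: xs) p.2 0, p.2 - p.1 + 1)) ∘
        Prod.map (fun k : Nat => (k : Int)) (fun k : Nat => (k : Int)))
      = pvEmit (x :: xs) := by
    funext p
    obtain ⟨s, e⟩ := p
    simp [Prod.map, pvEmit, PySem.List.pyGetD_natCast]
  rw [hemit, pv_trunc]
  exact pv_main_alt xs x

-- ===== VERDICT (by name: the statement is the Claim_ definition above) =====
theorem group_frequencies_py_spec : Claim_equal_group_frequencies_py := by
  intro fs _ hpre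
  unfold Spec_group_frequencies_py
  cases fs with
  | nil => exact absurd rfl hpre
  | cons x xs => rw [pv_a_runs, pv_alt_eq]
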